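-- pv_equiv track=rewrite | github.com/ssime-git/scraping_wtj | packages/wttj-scraper/src/wttj_scraper/detail.py | _values_after_label_until_next_section
-- ===== SOURCE A (Python) =====
-- def _values_after_label_until_next_section(
--     lines: list[str], label: str, stop_labels: tuple[str, ...]
-- ) -> list[str]:
--     label_normalized = label.lower().rstrip(":")
--     stop_set = {stop.lower().rstrip(":") for stop in stop_labels}
--     values: list[str] = []
--     collecting = False
--     for line in lines:
--         normalized = line.lower().rstrip(":").strip()
--         if normalized == label_normalized:
--             collecting = True
--             continue
--         if collecting and normalized in stop_set:
--             break
--         if collecting: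
--             values.append(line)
--     return values
-- ===== SOURCE B (Python) =====
-- def _values_after_label_until_next_section(
--     lines: list[str], label: str, stop_labels: tuple[str, ...]
-- ) -> list[str]:
--     target = label.lower().rstrip(":")
--     stops = {stop.lower().rstrip(":") for stop in stop_labels}
--     norms = [line.lower().rstrip(":").strip() for line in lines]
--     try:
--         start = norms.index(target)
--     except ValueError:
--         return []
--     body = lines[start + 1 :]
--     stop = next((i for i, n in enumerate(norms[start + 1 :]) if n in stops), len(body))
--     return body[:stop]
-- ===== Notes on version B (the rewrite author's own statement) =====
-- stated objective: alternative
-- what changed: Replaces A's single stateful scan with a collecting flag and break by a decomposition: normalize every line once, find the label's index, find the first stop index after it, and return the slice between them; Pre_ excludes inputs where the label's normalized form matches more than one line, a corner where A's skip-and-resume over repeated label lines and B's plain slice are both defensible.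
-- outside the precondition, e.g. on _values_after_label_until_next_section(['a', 'x', 'a', 'y'], 'a', ()): A returns ['x', 'y'], B returns ['x', 'a', 'y']
import Mathlib
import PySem

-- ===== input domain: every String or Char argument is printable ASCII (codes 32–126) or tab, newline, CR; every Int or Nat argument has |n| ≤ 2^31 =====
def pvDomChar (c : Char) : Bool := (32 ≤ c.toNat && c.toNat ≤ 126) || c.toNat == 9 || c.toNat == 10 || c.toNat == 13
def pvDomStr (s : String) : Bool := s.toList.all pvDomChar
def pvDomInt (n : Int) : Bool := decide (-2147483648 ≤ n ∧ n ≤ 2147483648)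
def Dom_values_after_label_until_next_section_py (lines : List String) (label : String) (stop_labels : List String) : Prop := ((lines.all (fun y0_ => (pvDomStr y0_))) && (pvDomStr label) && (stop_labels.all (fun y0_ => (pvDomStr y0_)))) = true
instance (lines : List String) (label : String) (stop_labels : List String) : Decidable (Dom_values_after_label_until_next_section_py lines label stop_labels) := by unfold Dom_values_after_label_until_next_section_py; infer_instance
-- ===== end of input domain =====

-- B replaces A's stateful collecting-flag loop by a decomposition: normalize once, find the label index, find the stop index, slice (objective: alternative, same cost).

-- shared helpers: the normalizations both Pythons compute
-- s.rstrip(":"): drop all trailing ':' characters (hand port; exact — rstrip with an explicit chars argument)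
def pvRstripColon (cs : List Char) : List Char := (cs.reverse.dropWhile (· == ':')).reverse
-- label.lower().rstrip(":")  (no strip)
def pvLabelNorm (s : String) : List Char := pvRstripColon (PySem.Chars.lower s.toList)
-- line.lower().rstrip(":").strip()
def pvNorm (s : String) : List Char := PySem.Chars.strip (pvRstripColon (PySem.Chars.lower s.toList))

-- ===== PORT A =====
-- the for-loop with its 'values'/'collecting' state and the break, as structural recursion
def pvLoopA (labelN : List Char) (stopSet : PySem.Set (List Char)) :
    List String → List String → Bool → List String
  | [], values, _ => values
  | line :: rest, values, collecting =>
    let normalized := pvNorm line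
    if normalized == labelN then pvLoopA labelN stopSet rest values true
    else if collecting && PySem.Set.contains stopSet normalized then values
    else if collecting then pvLoopA labelN stopSet rest (values ++ [line]) collecting
    else pvLoopA labelN stopSet rest values collecting

def values_after_label_until_next_section_py (lines : List String) (label : String) (stop_labels : List String) : List String :=
  let labelN := pvLabelNorm label
  let stopSet := PySem.Set.ofList (stop_labels.map pvLabelNorm)
  pvLoopA labelN stopSet lines [] false

-- ===== PORT B =====
def values_after_label_until_next_section_py_alt (lines : List String) (label : String) (stop_labels : List String) : List String :=
  let target := pvLabelNorm label
  let stops := PySem.Set.ofList (stop_labels.map pvLabelNorm)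
  let norms := lines.map pvNorm
  match norms.findIdx? (fun n => n == target) with       -- norms.index(target), ValueError → []
  | none => []
  | some start =>
    let body := PySem.List.slice lines (some ((start : Int) + 1)) none
    let stop : Nat :=
      ((PySem.List.slice norms (some ((start : Int) + 1)) none).findIdx?
        (fun n => PySem.Set.contains stops n)).getD body.length
    PySem.List.slice body none (some (stop : Int))

-- ===== PRECONDITION & SPEC =====
-- Pre_ excludes inputs where the label's normalized form matches more than one line: there A's
-- skip-and-resume over the repeated label lines and B's plain slice are both defensible readings.
def Pre_values_after_label_until_next_section_py (lines : List String) (label : String) (stop_labels : List String) : Prop :=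
  lines.countP (fun l => pvNorm l == pvLabelNorm label) ≤ 1
instance (lines : List String) (label : String) (stop_labels : List String) : Decidable (Pre_values_after_label_until_next_section_py lines label stop_labels) := by unfold Pre_values_after_label_until_next_section_py; infer_instance

def pvWitness_values_after_label_until_next_section_py : List String × String × List String :=
  (["Skills:", "Python", "SQL", "Languages:", "French"], "skills", ["Languages"])

def Spec_values_after_label_until_next_section_py (lines : List String) (label : String) (stop_labels : List String) (out : List String) : Prop := out = values_after_label_until_next_section_py_alt lines label stop_labels
instance (lines : List String) (label : String) (stop_labels : List String) (out : List String) : Decidable (Spec_values_after_label_until_next_section_py lines label stop_labels out) := by unfold Spec_values_after_label_until_next_section_py; infer_instance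

-- ===== CLAIM (what is proved, stated in full; the proofs are below) =====
def Claim_equal_values_after_label_until_next_section_py : Prop := ∀ (lines : List String) (label : String) (stop_labels : List String), Dom_values_after_label_until_next_section_py lines label stop_labels → Pre_values_after_label_until_next_section_py lines label stop_labels → Spec_values_after_label_until_next_section_py lines label stop_labels (values_after_label_until_next_section_py lines label stop_labels)

-- ===== LEMMAS AND PROOFS =====

theorem pvWitness_ok :
    Dom_values_after_label_until_next_section_py pvWitness_values_after_label_until_next_section_py.1 pvWitness_values_after_label_until_next_section_py.2.1 pvWitness_values_after_label_until_next_section_py.2.2 ∧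
    Pre_values_after_label_until_next_section_py pvWitness_values_after_label_until_next_section_py.1 pvWitness_values_after_label_until_next_section_py.2.1 pvWitness_values_after_label_until_next_section_py.2.2 := by
  decide

-- what A's loop computes once it is collecting
def pvRegion (labelN : List Char) (stopSet : PySem.Set (List Char))
    (pairs : List (String × List Char)) : List String :=
  ((pairs.take ((pairs.findIdx? (fun p => !(p.2 == labelN) && PySem.Set.contains stopSet p.2)).getD pairs.length)).filter
      (fun p => !(p.2 == labelN))).map (·.1)

theorem pvLoopA_true (labelN : List Char) (stopSet : PySem.Set (List Char)) :
    ∀ (L vs : List String),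
      pvLoopA labelN stopSet L vs true = vs ++ pvRegion labelN stopSet (L.zip (L.map pvNorm)) := by
  intro L
  induction L with
  | nil => intro vs; simp [pvLoopA, pvRegion]
  | cons x rest ih =>
    intro vs
    simp only [List.map_cons, List.zip_cons_cons]
    by_cases h1 : pvNorm x == labelN
    · simp [pvLoopA, h1, ih, pvRegion, List.findIdx?_cons]
    · by_cases h2 : pvNorm x ∈ stopSet
      · simp [pvLoopA, h1, h2, pvRegion, List.findIdx?_cons, PySem.Set.contains]
      · simp [pvLoopA, h1, h2, ih, pvRegion, List.findIdx?_cons, PySem.Set.contains]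

theorem pvLoopA_false (labelN : List Char) (stopSet : PySem.Set (List Char)) :
    ∀ (L : List String),
      pvLoopA labelN stopSet L [] false =
        match (L.map pvNorm).findIdx? (fun n => n == labelN) with
        | none => []
        | some start => pvRegion labelN stopSet ((L.zip (L.map pvNorm)).drop (start + 1)) := by
  intro L
  induction L with
  | nil => simp [pvLoopA]
  | cons x rest ih =>
    simp only [List.map_cons, List.zip_cons_cons]
    by_cases h1 : pvNorm x == labelN
    · simp [pvLoopA, h1, List.findIdx?_cons, pvLoopA_true]
    · simp only [pvLoopA, h1, Bool.false_and, ih, List.findIdx?_cons]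
      cases hf : (rest.map pvNorm).findIdx? (fun n => n == labelN) with
      | none => rfl
      | some i => rfl

theorem findIdx?_congr_mem {α : Type} (p q : α → Bool) :
    ∀ l : List α, (∀ x ∈ l, p x = q x) → l.findIdx? p = l.findIdx? q := by
  intro l
  induction l with
  | nil => intro _; rfl
  | cons a t ih =>
    intro h
    simp only [List.findIdx?_cons, h a (by simp)]
    rw [ih (fun x hx => h x (by simp [hx]))]

-- when no line of the region normalizes to the label, A's region computation is take-until-stop
theorem pvRegion_no_label (labelN : List Char) (stopSet : PySem.Set (List Char))
    (pairs : List (String × List Char))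
    (h : ∀ p ∈ pairs, (p.2 == labelN) = false) :
    pvRegion labelN stopSet pairs =
      (pairs.take ((pairs.findIdx? (fun p => PySem.Set.contains stopSet p.2)).getD pairs.length)).map (·.1) := by
  unfold pvRegion
  rw [findIdx?_congr_mem _ (fun p => PySem.Set.contains stopSet p.2) pairs
      (fun x hx => by simp [h x hx])]
  rw [List.filter_eq_self.mpr (fun x hx => by simp [h x (List.mem_of_mem_take hx)])]

-- ===== VERDICT (by name: the statement is the Claim_ definition above) =====
theorem values_after_label_until_next_section_py_spec :
    Claim_equal_values_after_label_until_next_section_py := by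
  unfold Claim_equal_values_after_label_until_next_section_py
  intro lines label stop_labels _ hpre
  unfold Spec_values_after_label_until_next_section_py
  unfold values_after_label_until_next_section_py values_after_label_until_next_section_py_alt
  rw [pvLoopA_false]
  cases hf : (lines.map pvNorm).findIdx? (fun n => n == pvLabelNorm label) with
  | none => simp [hf]
  | some start =>
    simp only [hf]
    -- normalize B's slices to drop/take
    have h1 : ((start : Int) + 1) = ((start + 1 : Nat) : Int) := by push_cast; ring
    rw [h1, PySem.List.slice_from_natCast, PySem.List.slice_from_natCast,
        PySem.List.slice_to_natCast]
    -- no label occurrence after index start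
    have hstart := List.findIdx?_eq_some_iff_findIdx_eq.mp hf
    have hlt : start < lines.length := by simpa using hstart.1
    have hpstart : pvNorm (lines.get ⟨start, hlt⟩) == pvLabelNorm label := by
      have := List.findIdx?_eq_some_iff_getElem.mp hf
      obtain ⟨h, hp, -⟩ := this
      simpa using hp
    have hnolabel : ∀ x ∈ lines.drop (start + 1), (pvNorm x == pvLabelNorm label) = false := by
      intro x hx
      by_contra hne
      have hx' : (pvNorm x == pvLabelNorm label) = true := by
        cases hb : (pvNorm x == pvLabelNorm label) <;> simp_all
      -- count: element at start plus x gives count ≥ 2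
      have hsplit : lines = lines.take (start + 1) ++ lines.drop (start + 1) :=
        (List.take_append_drop _ _).symm
      have hmem : lines.get ⟨start, hlt⟩ ∈ lines.take (start + 1) := by
        rw [List.mem_take_iff_getElem]
        refine ⟨start, by omega, rfl⟩
      have hc1 : 0 < (lines.take (start + 1)).countP (fun l => pvNorm l == pvLabelNorm label) :=
        List.countP_pos_iff.mpr ⟨_, hmem, hpstart⟩
      have hc2 : 0 < (lines.drop (start + 1)).countP (fun l => pvNorm l == pvLabelNorm label) :=
        List.countP_pos_iff.mpr ⟨_, hx, hx'⟩
      have : 2 ≤ lines.countP (fun l => pvNorm l == pvLabelNorm label) := by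
        conv_rhs => rw [hsplit]
        rw [List.countP_append]; omega
      exact absurd hpre (by unfold Pre_values_after_label_until_next_section_py; omega)
    -- pairs after start, as a map over the dropped lines
    have hzip : (lines.zip (lines.map pvNorm)).drop (start + 1)
        = (lines.drop (start + 1)).map (fun x => (x, pvNorm x)) := by
      rw [show lines.zip (lines.map pvNorm) = (lines.map id).zip (lines.map pvNorm) by simp,
          List.zip_map', List.map_drop]
      simp
    rw [hzip, pvRegion_no_label _ _ _ (by intro p hp; obtain ⟨x, hx, rfl⟩ := List.mem_map.mp hp; exact hnolabel x hx)]
    simp [List.map_drop, List.map_take, Function.comp_def]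
    rw [← List.map_drop, ← List.map_drop, List.findIdx?_map, List.findIdx?_map]
    rfl
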